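-- pv_equiv track=rewrite | github.com/dishamakhija/PromptEM | data_preprocessor.py | map_entities
-- ===== SOURCE A (Python) =====
-- import collections
-- import itertools
--
-- def map_entities(entity_lists):
--     ## A custom mapper function
--
--     #counter = itertools.count().next
--     #names = collections.defaultdict(next(itertools.count()))
--     counter = itertools.count().__next__
--     names = collections.defaultdict(counter)
--
--     mapped_entities = []
--     for entity_list in entity_lists:
--         new_list = [names[item] for item in entity_list]
--         mapped_entities.append(new_list)
--     mappings = dict((name, idx) for idx, name in names.items())
--
--     return mapped_entities, mappings
-- ===== SOURCE B (Python) =====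
-- def map_entities(entity_lists):
--     # Sort-based scheme: record each entity's FIRST occurrence position by
--     # overwriting a dict while scanning the flattened input right-to-left,
--     # then recover the id order by sorting the entities by that position.
--     flat = [x for el in entity_lists for x in el]
--     first = {}
--     for i, x in reversed(list(enumerate(flat))):
--         first[x] = i
--     order = sorted(first, key=first.__getitem__)
--     names = {x: r for r, x in enumerate(order)}
--     mapped_entities = [[names[x] for x in el] for el in entity_lists]
--     mappings = dict(enumerate(order))
--     return mapped_entities, mappings
-- ===== Notes on version B (the rewrite author's own statement) =====
-- stated objective: alternative
-- what changed: Instead of assigning ids lazily from a counter inside the mapping loop, B records each entity's first-occurrence position by overwriting a dict in a right-to-left scan of the flattened input, then SORTS the distinct entities by that position to obtain the id order and maps by lookup.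
import Mathlib
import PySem

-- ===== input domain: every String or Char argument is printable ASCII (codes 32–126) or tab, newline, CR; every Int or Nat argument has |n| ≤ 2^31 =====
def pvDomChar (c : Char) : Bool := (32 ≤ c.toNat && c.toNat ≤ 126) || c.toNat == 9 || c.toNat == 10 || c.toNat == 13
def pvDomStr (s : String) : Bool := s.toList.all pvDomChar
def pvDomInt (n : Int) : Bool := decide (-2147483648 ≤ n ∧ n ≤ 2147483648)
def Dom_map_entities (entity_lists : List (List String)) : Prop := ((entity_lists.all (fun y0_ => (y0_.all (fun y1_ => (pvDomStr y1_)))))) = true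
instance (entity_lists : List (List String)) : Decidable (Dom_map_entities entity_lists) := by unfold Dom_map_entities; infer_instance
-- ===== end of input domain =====

-- B replaces A's lazy counter-in-the-loop id assignment by a right-to-left first-position scan followed by a sort by first position (alternative algorithm, same result).
-- ===== PORT A =====
-- names[item] on a defaultdict(counter): return the stored id, or assign the next counter value on a miss
def pvStepA (d : PySem.Dict String Int) (cnt : Int) (x : String) : Int × PySem.Dict String Int × Int :=
  match d.get? x with
  | some v => (v, d, cnt)
  | none => (cnt, d.insert x cnt, cnt + 1)

-- new_list = [names[item] for item in entity_list], threading the defaultdict/counter state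
def pvInnerA : List String → PySem.Dict String Int → Int → List Int × PySem.Dict String Int × Int
  | [], d, cnt => ([], d, cnt)
  | x :: xs, d, cnt =>
    let s := pvStepA d cnt x
    let r := pvInnerA xs s.2.1 s.2.2
    (s.1 :: r.1, r.2.1, r.2.2)

-- the outer 'for entity_list in entity_lists' loop accumulating mapped_entities
def pvOuterA : List (List String) → PySem.Dict String Int → Int → List (List Int) × PySem.Dict String Int × Int
  | [], d, cnt => ([], d, cnt)
  | el :: rest, d, cnt =>
    let s := pvInnerA el d cnt
    let r := pvOuterA rest s.2.1 s.2.2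
    (s.1 :: r.1, r.2.1, r.2.2)

def map_entities (entity_lists : List (List String)) : List (List Int) × (List (Int × String)) :=
  let s := pvOuterA entity_lists PySem.Dict.empty 0
  -- mappings = dict((name, idx) for idx, name in names.items()): values (the ids) are unique, so the dict is just the swapped items
  (s.1, s.2.1.items.map (fun p => (p.2, p.1)))

-- ===== PORT B =====
def map_entities_alt (entity_lists : List (List String)) : List (List Int) × (List (Int × String)) :=
  -- flat = [x for el in entity_lists for x in el]
  let flat := entity_lists.flatMap (fun el => el)
  -- for i, x in reversed(list(enumerate(flat))): first[x] = i
  let first : PySem.Dict String Int :=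
    ((PySem.List.enumerate flat).reverse).foldl (fun d p => d.insert p.2 p.1) PySem.Dict.empty
  -- order = sorted(first, key=first.__getitem__); every key is in the dict, so getD 0 is that (always-hitting) lookup
  let order := PySem.List.sorted first.keys (fun x => first.getD x 0) false
  -- names = {x: r for r, x in enumerate(order)}
  let names : PySem.Dict String Int :=
    PySem.Dict.ofList ((PySem.List.enumerate order).map (fun p => (p.2, p.1)))
  -- names[x]: mapping only looks up entities of the input, so the lookup always hits; getD 0 is its total form
  let mapped := entity_lists.map (fun el => el.map (fun x => (names.get? x).getD 0))
  -- mappings = dict(enumerate(order)): the indices are distinct keys, so the dict is just enumerate(order)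
  (mapped, PySem.List.enumerate order)

-- ===== PRECONDITION & SPEC =====
def Spec_map_entities (entity_lists : List (List String)) (out : List (List Int) × (List (Int × String))) : Prop := out = map_entities_alt entity_lists
instance (entity_lists : List (List String)) (out : List (List Int) × (List (Int × String))) : Decidable (Spec_map_entities entity_lists out) := by unfold Spec_map_entities; infer_instance

-- ===== CLAIM (what is proved, stated in full; the proofs are below) =====
def Claim_equal_map_entities : Prop := ∀ (entity_lists : List (List String)), Dom_map_entities entity_lists → Spec_map_entities entity_lists (map_entities entity_lists)

-- ===== LEMMAS AND PROOFS =====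

-- the entity→id association pairs after the flat prefix ys has been consumed
def pvPairs (ys : List String) : List (String × Int) :=
  (PySem.List.enumerate (PySem.List.dedup ys)).map (fun p => (p.2, p.1))

-- A's defaultdict state after consuming ys
def pvN (ys : List String) : PySem.Dict String Int := PySem.Dict.mk (pvPairs ys)

theorem map_fst_pvPairs (ys : List String) :
    (pvPairs ys).map Prod.fst = PySem.List.dedup ys := by
  unfold pvPairs
  rw [List.map_map]
  exact PySem.List.map_snd_enumerate _ _

theorem keys_pvN (ys : List String) : (pvN ys).keys = PySem.List.dedup ys := by
  show (pvPairs ys).map Prod.fst = _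
  exact map_fst_pvPairs ys

theorem get?_pvN_some (ys : List String) (x : String) (h : x ∈ ys) :
    ∃ v, (pvN ys).get? x = some v := by
  have hs : ((pvN ys).get? x).isSome := by
    rw [← PySem.Dict.contains_eq_isSome_get?]
    exact (PySem.Dict.contains_iff_mem_keys _ _).2
      (by rw [keys_pvN]; exact (PySem.List.mem_dedup ys x).2 h)
  exact Option.isSome_iff_exists.1 hs

theorem get?_pvN_none (ys : List String) (x : String) (h : x ∉ ys) :
    (pvN ys).get? x = none := by
  rw [PySem.Dict.get?_eq_none_iff_not_mem_keys, keys_pvN, PySem.List.mem_dedup]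
  exact h

theorem get?_mk_append (l1 l2 : List (String × Int)) (x : String) :
    (PySem.Dict.mk (l1 ++ l2)).get? x
      = ((PySem.Dict.mk l1).get? x).or ((PySem.Dict.mk l2).get? x) := by
  simp [PySem.Dict.get?, List.find?_append, Option.map_or]

theorem pvPairs_append (ys zs : List String) :
    ∃ l2, pvPairs (ys ++ zs) = pvPairs ys ++ l2 := by
  have h : pvPairs (ys ++ zs) = pvPairs ys ++
      ((PySem.List.enumerate
        (List.filter (fun y => !(PySem.Set.ofList ys).contains y) (PySem.Set.ofList zs))
        (0 + ((PySem.Set.ofList ys : List String).length : Int))).map (fun p => (p.2, p.1))) := by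
    unfold pvPairs
    rw [PySem.List.dedup_eq_ofList (ys ++ zs), PySem.Set.ofList_append,
      PySem.Set.update_eq_append_filter, PySem.List.enumerate_append, List.map_append,
      PySem.List.dedup_eq_ofList ys]
  exact ⟨_, h⟩

theorem get?_pvN_append (ys zs : List String) (x : String) (h : x ∈ ys) :
    (pvN (ys ++ zs)).get? x = (pvN ys).get? x := by
  obtain ⟨l2, hp⟩ := pvPairs_append ys zs
  obtain ⟨v, hv⟩ := get?_pvN_some ys x h
  have h1 : pvN (ys ++ zs) = PySem.Dict.mk (pvPairs ys ++ l2) := by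
    unfold pvN; rw [hp]
  rw [h1, get?_mk_append]
  rw [show PySem.Dict.mk (pvPairs ys) = pvN ys from rfl, hv]
  rfl

theorem step_pvN (ys : List String) (x : String) :
    pvStepA (pvN ys) ((PySem.List.dedup ys).length : Int) x =
      ((pvN (ys ++ [x])).getD x 0, pvN (ys ++ [x]), ((PySem.List.dedup (ys ++ [x])).length : Int)) := by
  by_cases hx : x ∈ ys
  · -- already present: dict and counter unchanged
    have hded : PySem.List.dedup (ys ++ [x]) = PySem.List.dedup ys := by
      rw [PySem.List.dedup_eq_ofList, PySem.Set.ofList_append_singleton, ← PySem.List.dedup_eq_ofList]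
      simp [PySem.Set.add, hx]
    have hN : pvN (ys ++ [x]) = pvN ys := by
      unfold pvN pvPairs; rw [hded]
    obtain ⟨v, hv⟩ := get?_pvN_some ys x hx
    rw [hN, hded]
    unfold pvStepA
    rw [hv]
    simp [PySem.Dict.getD_eq_get?_getD, hv]
  · -- fresh: appended with id = current counter value
    have hget : (pvN ys).get? x = none := get?_pvN_none ys x hx
    have hcont : (pvN ys).contains x = false := by
      rw [PySem.Dict.contains_eq_isSome_get?, hget]; rfl
    have hded : PySem.List.dedup (ys ++ [x]) = PySem.List.dedup ys ++ [x] := by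
      rw [PySem.List.dedup_eq_ofList, PySem.Set.ofList_append_singleton, ← PySem.List.dedup_eq_ofList]
      simp [PySem.Set.add, hx]
    have hpairs : pvPairs (ys ++ [x]) = pvPairs ys ++ [(x, ((PySem.List.dedup ys).length : Int))] := by
      unfold pvPairs
      rw [hded, PySem.List.enumerate_append, List.map_append]
      simp [PySem.List.enumerate]
    have hNi : pvN (ys ++ [x]) = (pvN ys).insert x ((PySem.List.dedup ys).length : Int) := by
      apply PySem.Dict.ext
      rw [PySem.Dict.items_insert_of_not_contains _ _ hcont]
      exact hpairs
    have hgd : (pvN (ys ++ [x])).getD x 0 = ((PySem.List.dedup ys).length : Int) := by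
      rw [hNi, PySem.Dict.getD_eq_get?_getD, PySem.Dict.get?_insert_self]; rfl
    unfold pvStepA
    rw [hget, hgd, hNi, hded]
    simp only [List.length_append, List.length_cons, List.length_nil]
    push_cast
    ring_nf

theorem inner_pvN (el ys : List String) :
    pvInnerA el (pvN ys) ((PySem.List.dedup ys).length : Int) =
      (el.map (fun x => (pvN (ys ++ el)).getD x 0), pvN (ys ++ el), ((PySem.List.dedup (ys ++ el)).length : Int)) := by
  induction el generalizing ys with
  | nil => simp [pvInnerA]
  | cons x xs ih =>
    simp only [pvInnerA]
    rw [step_pvN]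
    have ih' := ih (ys ++ [x])
    simp only [List.append_assoc, List.singleton_append] at ih'
    rw [ih']
    have hhead : (pvN (ys ++ [x])).getD x 0 = (pvN (ys ++ x :: xs)).getD x 0 := by
      have he : ys ++ x :: xs = (ys ++ [x]) ++ xs := by simp
      rw [he, PySem.Dict.getD_eq_get?_getD, PySem.Dict.getD_eq_get?_getD,
        get?_pvN_append (ys ++ [x]) xs x (by simp)]
    rw [hhead]
    rfl

theorem outer_pvN (els : List (List String)) (ys : List String) :
    pvOuterA els (pvN ys) ((PySem.List.dedup ys).length : Int) =
      (els.map (fun el => el.map (fun x => (pvN (ys ++ els.flatten)).getD x 0)),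
        pvN (ys ++ els.flatten), ((PySem.List.dedup (ys ++ els.flatten)).length : Int)) := by
  induction els generalizing ys with
  | nil => simp [pvOuterA]
  | cons el rest ih =>
    simp only [pvOuterA]
    rw [inner_pvN]
    have ih' := ih (ys ++ el)
    simp only [List.append_assoc] at ih'
    rw [ih']
    simp only [List.flatten_cons, List.map_cons, ← List.append_assoc]
    have hhead : el.map (fun x => (pvN (ys ++ el)).getD x 0)
        = el.map (fun x => (pvN (ys ++ el ++ rest.flatten)).getD x 0) := by
      apply List.map_congr_left
      intro x hx
      rw [PySem.Dict.getD_eq_get?_getD, PySem.Dict.getD_eq_get?_getD,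
        get?_pvN_append (ys ++ el) rest.flatten x (by simp [hx])]
    rw [hhead]

theorem ofList_pvPairs (ys : List String) :
    PySem.Dict.ofList (pvPairs ys) = pvN ys := by
  apply PySem.Dict.ext
  show (PySem.Dict.update PySem.Dict.empty (pvPairs ys)).items = pvPairs ys
  unfold PySem.Dict.update
  rw [PySem.Dict.items_foldl_insert_fresh (pvPairs ys) Prod.fst Prod.snd PySem.Dict.empty
      (fun a _ => PySem.Dict.contains_empty _)
      (by rw [map_fst_pvPairs]; exact PySem.List.nodup_dedup _)]
  simp [PySem.Dict.empty]

-- ===== B-side lemmas: the backward first-position dict and the sort =====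

-- the foldr form of B's backward loop (foldl over the reversed enumeration)
def pvFirstD (xs : List String) (s : Int) : PySem.Dict String Int :=
  (PySem.List.enumerate xs s).foldr (fun p d => d.insert p.2 p.1) PySem.Dict.empty

theorem pvFirstD_cons (x : String) (xs : List String) (s : Int) :
    pvFirstD (x :: xs) s = (pvFirstD xs (s + 1)).insert x s := by
  simp [pvFirstD, PySem.List.enumerate_cons]

theorem get?_pvFirstD (xs : List String) (s : Int) (x : String) (h : x ∈ xs) :
    (pvFirstD xs s).get? x = some (s + (List.idxOf x xs : Int)) := by
  induction xs generalizing s with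
  | nil => cases h
  | cons y ys ih =>
    rw [pvFirstD_cons]
    by_cases hxy : x = y
    · subst hxy
      rw [PySem.Dict.get?_insert_self]
      simp
    · rw [PySem.Dict.get?_insert]
      rw [if_neg hxy]
      have hmem : x ∈ ys := by
        rcases List.mem_cons.1 h with h1 | h1
        · exact absurd h1 hxy
        · exact h1
      rw [ih (s + 1) hmem]
      have : List.idxOf x (y :: ys) = List.idxOf x ys + 1 := by
        rw [List.idxOf_cons]
        simp [beq_eq_false_iff_ne.2 (fun he => hxy he.symm)]
      rw [this]
      push_cast
      ring_nf

theorem mem_keys_pvFirstD (xs : List String) (s : Int) (y : String) :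
    y ∈ (pvFirstD xs s).keys ↔ y ∈ xs := by
  induction xs generalizing s with
  | nil => simp [pvFirstD, PySem.List.enumerate_nil, PySem.Dict.keys_empty]
  | cons x t ih =>
    rw [pvFirstD_cons, PySem.Dict.mem_keys_insert]
    simp [ih (s + 1)]

theorem nodup_keys_pvFirstD (xs : List String) (s : Int) :
    (pvFirstD xs s).keys.Nodup := by
  induction xs generalizing s with
  | nil => simp [pvFirstD, PySem.List.enumerate_nil, PySem.Dict.keys_empty]
  | cons x t ih => rw [pvFirstD_cons]; exact PySem.Dict.nodup_keys_insert _ _ _ (ih (s + 1))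

-- dedup lists each entity at its first occurrence, so first-occurrence indices strictly increase along it
theorem pairwise_idxOf_dedup (xs : List String) :
    (PySem.List.dedup xs).Pairwise (fun a b => List.idxOf a xs < List.idxOf b xs) := by
  induction xs using List.reverseRecOn with
  | nil => simp
  | append_singleton ys x ih =>
    by_cases hx : x ∈ ys
    · have hded : PySem.List.dedup (ys ++ [x]) = PySem.List.dedup ys := by
        rw [PySem.List.dedup_eq_ofList, PySem.Set.ofList_append_singleton, ← PySem.List.dedup_eq_ofList]
        simp [PySem.Set.add, hx]
      rw [hded]
      refine List.Pairwise.imp_of_mem ?_ ih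
      intro a b ha hb hab
      have ha' : a ∈ ys := (PySem.List.mem_dedup ys a).1 ha
      have hb' : b ∈ ys := (PySem.List.mem_dedup ys b).1 hb
      rw [List.idxOf_append_of_mem ha', List.idxOf_append_of_mem hb']
      exact hab
    · have hded : PySem.List.dedup (ys ++ [x]) = PySem.List.dedup ys ++ [x] := by
        rw [PySem.List.dedup_eq_ofList, PySem.Set.ofList_append_singleton, ← PySem.List.dedup_eq_ofList]
        simp [PySem.Set.add, hx]
      rw [hded, List.pairwise_append]
      refine ⟨?_, by simp, ?_⟩
      · refine List.Pairwise.imp_of_mem ?_ ih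
        intro a b ha hb hab
        have ha' : a ∈ ys := (PySem.List.mem_dedup ys a).1 ha
        have hb' : b ∈ ys := (PySem.List.mem_dedup ys b).1 hb
        rw [List.idxOf_append_of_mem ha', List.idxOf_append_of_mem hb']
        exact hab
      · intro a ha b hb
        rw [List.mem_singleton] at hb
        subst hb
        have ha' : a ∈ ys := (PySem.List.mem_dedup ys a).1 ha
        rw [List.idxOf_append_of_mem ha']
        have hlt : List.idxOf a ys < ys.length := List.idxOf_lt_length_of_mem ha'
        have hx' : List.idxOf b (ys ++ [b]) = ys.length := by
          rw [List.idxOf_append]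
          simp [List.idxOf_eq_length_iff.2 hx]
        omega

-- sorting the first-position dict's keys by their first position reproduces first-appearance order
theorem sorted_pvFirstD (flat : List String) :
    PySem.List.sorted (pvFirstD flat 0).keys (fun x => (pvFirstD flat 0).getD x 0) false
      = PySem.List.dedup flat := by
  apply PySem.List.sorted_eq_of_perm_of_pairwise_lt
  · exact (List.perm_ext_iff_of_nodup (PySem.List.nodup_dedup flat) (nodup_keys_pvFirstD flat 0)).2
      (fun a => by rw [PySem.List.mem_dedup, ← mem_keys_pvFirstD flat 0 a])
  · refine List.Pairwise.imp_of_mem ?_ (pairwise_idxOf_dedup flat)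
    intro a b ha hb hab
    have ha' : a ∈ flat := (PySem.List.mem_dedup flat a).1 ha
    have hb' : b ∈ flat := (PySem.List.mem_dedup flat b).1 hb
    rw [PySem.Dict.getD_eq_get?_getD, PySem.Dict.getD_eq_get?_getD,
      get?_pvFirstD flat 0 a ha', get?_pvFirstD flat 0 b hb']
    simpa using hab

-- ===== VERDICT (by name: the statement is the Claim_ definition above) =====
theorem map_entities_spec : Claim_equal_map_entities := by
  intro els _
  show map_entities els = map_entities_alt els
  simp only [map_entities, map_entities_alt]
  -- evaluate A's loop
  have h := outer_pvN els []
  simp only [List.nil_append] at h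
  conv_lhs =>
    rw [show (PySem.Dict.empty : PySem.Dict String Int) = pvN [] from rfl,
      show (0 : Int) = ((PySem.List.dedup ([] : List String)).length : Int) from rfl]
  rw [h]
  -- B's flattened input
  rw [show List.flatMap (fun el => el) els = els.flatten from by simp]
  -- B's backward loop is the foldr over the enumeration
  rw [List.foldl_reverse]
  rw [show (PySem.List.enumerate els.flatten).foldr
        (fun p (d : PySem.Dict String Int) => d.insert p.2 p.1) PySem.Dict.empty
      = pvFirstD els.flatten 0 from rfl]
  -- the sort re-establishes first-appearance order
  rw [sorted_pvFirstD els.flatten]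
  -- B's names dict is A's final defaultdict
  rw [show (PySem.List.enumerate (PySem.List.dedup els.flatten)).map (fun p => (p.2, p.1))
      = pvPairs els.flatten from rfl, ofList_pvPairs]
  -- both components agree
  refine Prod.ext ?_ ?_
  · simp [PySem.Dict.getD_eq_get?_getD]
  · show (pvN els.flatten).items.map (fun p => (p.2, p.1)) = PySem.List.enumerate (PySem.List.dedup els.flatten)
    show (pvPairs els.flatten).map (fun p => (p.2, p.1)) = _
    unfold pvPairs
    rw [List.map_map]
    conv_rhs => rw [← List.map_id (PySem.List.enumerate (PySem.List.dedup els.flatten))]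
    apply List.map_congr_left
    intro p _
    rfl
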